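-- pv_equiv track=rewrite | github.com/saka-21/Old-Maid | babanuki_dir/models/babanuki_02.py | duplication_2_4
-- ===== SOURCE A (Python) =====
-- def duplication_2_4(player_only_num):
--     # 偶数枚の場合
--     dup_even = []
--     for x in set(player_only_num):
--         if player_only_num.count(x) == 2 or player_only_num.count(
--                 x) == 4:
--             dup_even.append(x)
--     # 重複しているindexを取得
--     index_even = []
--     for i, x in enumerate(player_only_num):
--         for h in dup_even:
--             if x == h:
--                 index_even.append(i)
--     return index_even
-- ===== SOURCE B (Python) =====
-- def duplication_2_4(player_only_num):
--     # Group the indices by value, pick the groups of size 2 or 4,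
--     # and recover ascending index order by sorting the flattened groups.
--     groups = {}
--     for i, x in enumerate(player_only_num):
--         groups[x] = groups.get(x, []) + [i]
--     picked = []
--     for idxs in groups.values():
--         if len(idxs) == 2 or len(idxs) == 4:
--             picked += idxs
--     return sorted(picked)
-- ===== Notes on version B (the rewrite author's own statement) =====
-- stated objective: faster
-- what changed: Instead of A's per-distinct-value count scans plus a nested index/membership loop, B groups indices by value in one enumerate pass, flattens the groups whose length is 2 or 4, and sorts the flattened indices to restore ascending order.
import Mathlib
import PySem

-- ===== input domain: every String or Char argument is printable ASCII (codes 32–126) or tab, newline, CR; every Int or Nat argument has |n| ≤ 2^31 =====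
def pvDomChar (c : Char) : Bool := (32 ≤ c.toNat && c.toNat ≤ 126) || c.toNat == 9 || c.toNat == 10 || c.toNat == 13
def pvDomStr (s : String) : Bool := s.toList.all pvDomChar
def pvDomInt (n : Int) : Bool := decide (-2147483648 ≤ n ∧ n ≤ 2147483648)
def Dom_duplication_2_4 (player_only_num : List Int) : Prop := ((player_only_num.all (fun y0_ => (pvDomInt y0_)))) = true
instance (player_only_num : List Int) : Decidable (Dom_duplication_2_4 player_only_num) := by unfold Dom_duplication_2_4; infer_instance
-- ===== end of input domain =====

-- B replaces A's per-distinct-value count scans plus nested index/membership loop by group-indices-by-value, pick groups of length 2 or 4, then sort the flattened indices (faster in a timing run).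

-- ===== PORT A =====
def duplication_2_4 (player_only_num : List Int) : List Int :=
  let dup_even : List Int :=
    (PySem.Set.ofList player_only_num).foldl
      (fun acc x =>
        if player_only_num.count x == 2 || player_only_num.count x == 4 then acc ++ [x] else acc) []
  (PySem.List.enumerate player_only_num).foldl
    (fun acc p => dup_even.foldl (fun acc2 h => if p.2 == h then acc2 ++ [p.1] else acc2) acc) []

-- ===== PORT B =====
def duplication_2_4_alt (player_only_num : List Int) : List Int :=
  let groups : PySem.Dict Int (List Int) :=
    (PySem.List.enumerate player_only_num).foldl
      (fun d p => d.modify p.2 [] (· ++ [p.1])) PySem.Dict.empty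
  let picked : List Int :=
    groups.values.foldl
      (fun acc idxs => if idxs.length == 2 || idxs.length == 4 then acc ++ idxs else acc) []
  PySem.List.sorted picked (fun x => x) false

-- ===== PRECONDITION & SPEC =====
def Spec_duplication_2_4 (player_only_num : List Int) (out : List Int) : Prop := out = duplication_2_4_alt player_only_num
instance (player_only_num : List Int) (out : List Int) : Decidable (Spec_duplication_2_4 player_only_num out) := by unfold Spec_duplication_2_4; infer_instance

-- ===== CLAIM (what is proved, stated in full; the proofs are below) =====
def Claim_equal_duplication_2_4 : Prop := ∀ (player_only_num : List Int), Dom_duplication_2_4 player_only_num → Spec_duplication_2_4 player_only_num (duplication_2_4 player_only_num)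

-- ===== LEMMAS AND PROOFS =====

-- appending i once for each match of x in a nodup list s = appending i iff x ∈ s
theorem inner_fold_eq (s : List Int) (hnd : s.Nodup) (x i : Int) (acc : List Int) :
    s.foldl (fun acc2 h => if x == h then acc2 ++ [i] else acc2) acc
      = acc ++ (if x ∈ s then [i] else []) := by
  rw [PySem.List.foldl_if_eq_foldl_filter,
    PySem.List.foldl_append_singleton_eq_map (f := fun _ => i)]
  congr 1
  by_cases hx : x ∈ s
  · have : s.filter (fun h => x == h) = [x] := by
      have h1 : s.filter (fun h => x == h) = s.filter (fun h => h == x) := by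
        apply List.filter_congr; intro a _; simp [eq_comm]
      rw [h1, List.filter_beq, List.count_eq_one_of_mem hnd hx]; simp
    simp [this, hx]
  · have : s.filter (fun h => x == h) = [] := by
      rw [List.filter_eq_nil_iff]; intro a ha
      simp only [beq_iff_eq]; rintro rfl; exact hx ha
    simp [this, hx]

-- a list splits (up to permutation) into its fibers over any nodup key cover
theorem perm_flatMap_filter_key {α κ : Type} [DecidableEq κ] (k : α → κ) :
    ∀ (ks : List κ) (l : List α), ks.Nodup → (∀ a ∈ l, k a ∈ ks) →
      l.Perm (ks.flatMap (fun c => l.filter (fun a => k a = c))) := by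
  intro ks
  induction ks with
  | nil => intro l _ hcov; cases l with
      | nil => simp
      | cons a t => exact absurd (hcov a (by simp)) (by simp)
  | cons c ks' ih =>
    intro l hnd hcov
    have hsplit : ((l.filter (fun a => k a = c)) ++ (l.filter (fun a => ¬ (k a = c)))).Perm l := by
      simpa using List.filter_append_perm (fun a => decide (k a = c)) l
    have hcov' : ∀ a ∈ l.filter (fun a => ¬ (k a = c)), k a ∈ ks' := by
      intro a ha
      have := List.of_mem_filter ha
      have hane : k a ≠ c := by simpa using this
      rcases List.mem_cons.mp (hcov a (List.mem_of_mem_filter ha)) with h | h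
      · exact absurd h hane
      · exact h
    have hrec := ih (l.filter (fun a => ¬ (k a = c))) hnd.of_cons hcov'
    have hfix : ks'.flatMap (fun c' => (l.filter (fun a => ¬ (k a = c))).filter (fun a => k a = c'))
        = ks'.flatMap (fun c' => l.filter (fun a => k a = c')) := by
      apply List.flatMap_congr
      intro c' hc'
      rw [List.filter_filter]
      apply List.filter_congr
      intro a _
      have hcc' : c' ≠ c := by rintro rfl; exact (List.nodup_cons.mp hnd).1 hc'
      by_cases h : k a = c'
      · simp [h, hcc']
      · simp [h]
    rw [List.flatMap_cons]
    exact hsplit.symm.trans (List.Perm.append_left _ (hfix ▸ hrec))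

theorem duplication_2_4_spec : Claim_equal_duplication_2_4 := by
  intro l _
  unfold Spec_duplication_2_4 duplication_2_4 duplication_2_4_alt
  simp only
  set P : Int → Bool := fun x => l.count x == 2 || l.count x == 4 with hP
  set E := PySem.List.enumerate l with hE
  set F := E.filter (fun p => P p.2) with hF
  set C := F.map (·.1) with hC
  -- ===== A side: A's result is C =====
  have hA : (E.foldl
      (fun acc p => ((PySem.Set.ofList l).foldl
        (fun acc x => if P x then acc ++ [x] else acc) []).foldl
          (fun acc2 h => if p.2 == h then acc2 ++ [p.1] else acc2) acc) []) = C := by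
    have hdup : (PySem.Set.ofList l).foldl
        (fun acc x => if P x then acc ++ [x] else acc) []
          = (PySem.Set.ofList l).filter P := by
      rw [PySem.List.foldl_append_if_eq_filter]; rfl
    rw [hdup]
    have hcong : E.foldl
        (fun acc p => ((PySem.Set.ofList l).filter P).foldl
          (fun acc2 h => if p.2 == h then acc2 ++ [p.1] else acc2) acc) []
        = E.foldl
          (fun acc p => if decide (p.2 ∈ (PySem.Set.ofList l).filter P) then acc ++ [p.1] else acc) [] := by
      apply PySem.List.foldl_congr_mem
      intro acc p _
      rw [inner_fold_eq _ (List.Nodup.filter _ (PySem.Set.nodup_ofList l)) p.2 p.1 acc]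
      by_cases h : p.2 ∈ (PySem.Set.ofList l).filter P <;> simp [h]
    rw [hcong, PySem.List.foldl_append_if
      (p := fun p => decide (p.2 ∈ (PySem.Set.ofList l).filter P)) (f := fun p : Int × Int => p.1)]
    simp only [List.nil_append, hC, hF]
    congr 1
    apply List.filter_congr
    intro p hp
    have hmem : p.2 ∈ l := by
      have h := PySem.List.map_snd_enumerate l 0
      exact h ▸ List.mem_map_of_mem hp
    simp [List.mem_filter, PySem.Set.mem_ofList, hmem]
  rw [hA]
  -- ===== B side: sorted(picked) is C =====
  -- the grouping dict's fibers
  have hget : ∀ x : Int, ((E.foldl (fun d p => d.modify p.2 [] (· ++ [p.1]))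
      PySem.Dict.empty).getD x []) = (E.filter (fun p => p.2 == x)).map (·.1) := by
    intro x
    have hswap : E.foldl (fun d p => d.modify p.2 [] (· ++ [p.1])) PySem.Dict.empty
        = (E.map Prod.swap).foldl (fun d p => d.modify p.1 [] (· ++ [p.2])) PySem.Dict.empty := by
      rw [List.foldl_map]; rfl
    rw [hswap, PySem.Dict.getD_foldl_modify_append, List.filter_map]
    show [] ++ _ = _
    rw [List.nil_append, List.map_map]
    rfl
  set groups := E.foldl (fun d p => d.modify p.2 [] (· ++ [p.1])) PySem.Dict.empty with hgroups
  have hkeys : groups.keys = PySem.Set.ofList l := by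
    rw [hgroups, PySem.Dict.keys_foldl_modify_key]
    have : E.map (·.2) = l := PySem.List.map_snd_enumerate l 0
    simp [this, PySem.Set.update, PySem.Set.ofList_eq_foldl, PySem.Dict.empty]
  have hnd : groups.keys.Nodup := hkeys ▸ PySem.Set.nodup_ofList l
  have hvals : groups.values = groups.keys.map (fun k => groups.getD k []) :=
    PySem.Dict.values_eq_map_keys groups hnd []
  -- the picked list
  have hpick : groups.values.foldl
      (fun acc idxs => if idxs.length == 2 || idxs.length == 4 then acc ++ idxs else acc) []
      = (groups.keys.flatMap (fun x => F.filter (fun p => p.2 == x))).map (·.1) := by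
    have h1 : groups.values.foldl
        (fun acc idxs => if idxs.length == 2 || idxs.length == 4 then acc ++ idxs else acc) []
        = groups.values.foldl
          (fun acc idxs => acc ++ (if idxs.length == 2 || idxs.length == 4 then idxs else [])) [] := by
      apply PySem.List.foldl_congr_mem
      intro acc idxs _
      by_cases h : (idxs.length == 2 || idxs.length == 4) = true <;> simp [h]
    rw [h1, PySem.List.foldl_append_eq_flatMap, List.nil_append, hvals, List.flatMap_map]
    have h2 : groups.keys.flatMap (fun a =>
        if ((groups.getD a []).length == 2 || (groups.getD a []).length == 4) = true
          then groups.getD a [] else [])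
        = groups.keys.flatMap (fun x => (F.filter (fun p => p.2 == x)).map (·.1)) := by
      apply List.flatMap_congr
      intro x hx
      rw [hget x]
      have hlen : ((E.filter (fun p => p.2 == x)).map (fun q : Int × Int => q.1)).length
          = l.count x := by
        rw [List.length_map, ← List.countP_eq_length_filter]
        have h : l.count x = List.countP (fun y => y == x) l := by simp [List.count]
        rw [h]
        conv_rhs => rw [← PySem.List.map_snd_enumerate l 0, List.countP_map]
        rfl
      have hfib : F.filter (fun p => p.2 == x) = E.filter (fun p => P p.2 && p.2 == x) := by
        rw [hF, List.filter_filter]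
        apply List.filter_congr
        intro p _; rw [Bool.and_comm]
      by_cases hPx : P x = true
      · have hc : (((E.filter (fun p => p.2 == x)).map (fun q : Int × Int => q.1)).length == 2
            || ((E.filter (fun p => p.2 == x)).map (fun q : Int × Int => q.1)).length == 4) = true := by
          rw [hlen]; exact hPx
        rw [if_pos hc, hfib]
        congr 1
        apply List.filter_congr
        intro p _
        by_cases hpx : (p.2 == x) = true
        · have : P p.2 = true := by rw [show p.2 = x from by simpa using hpx]; exact hPx
          simp [hpx, this]
        · simp [hpx]
      · have hc : ¬ (((E.filter (fun p => p.2 == x)).map (fun q : Int × Int => q.1)).length == 2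
            || ((E.filter (fun p => p.2 == x)).map (fun q : Int × Int => q.1)).length == 4) = true := by
          rw [hlen]; exact fun h => hPx h
        rw [if_neg hc, hfib]
        have hnil : E.filter (fun p => P p.2 && p.2 == x) = [] := by
          rw [List.filter_eq_nil_iff]
          intro p _
          by_cases hpx : (p.2 == x) = true
          · have : P p.2 = false := by
              rw [show p.2 = x from by simpa using hpx]
              exact Bool.not_eq_true _ |>.mp hPx
            simp [this]
          · simp [hpx]
        simp [hnil]
    rw [h2, ← List.map_flatMap]
  rw [hpick]
  -- permutation and order
  have hperm : C.Perm ((groups.keys.flatMap (fun x => F.filter (fun p => p.2 == x))).map (·.1)) := by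
    apply List.Perm.map
    have hcov : ∀ p ∈ F, p.2 ∈ groups.keys := by
      intro p hp
      rw [hkeys, PySem.Set.mem_ofList, ← PySem.List.map_snd_enumerate l 0]
      exact List.mem_map_of_mem (List.mem_of_mem_filter hp)
    have h := perm_flatMap_filter_key (fun p : Int × Int => p.2) groups.keys F hnd hcov
    have : groups.keys.flatMap (fun c => F.filter (fun a => decide (a.2 = c)))
        = groups.keys.flatMap (fun c => F.filter (fun a => a.2 == c)) := by
      apply List.flatMap_congr
      intro c _
      apply List.filter_congr
      intro p _
      by_cases h : p.2 = c <;> simp [h]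
    exact this ▸ h
  have hsorted : C.Pairwise (fun a b => a < b) := by
    rw [hC, List.pairwise_map]
    exact (PySem.List.pairwise_lt_enumerate l 0).filter _
  exact (PySem.List.sorted_eq_of_perm_of_pairwise_lt _ _ (fun x : Int => x) hperm hsorted).symm
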